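-- pv_equiv track=rewrite | github.com/sumwor/matching_pennies | python/matchpennies/WSLS.py | choice_counting
-- ===== SOURCE A (Python) =====
-- def choice_counting(choiceHistory, num):
--
--     leftCount=0
--     rightCount=0
--
--     if num==0:
--         for i in range(len(choiceHistory)):
--             if choiceHistory[i] == 1:
--                 leftCount+=1
--             else:
--                 rightCount+=1
--     else:
--         comb=choiceHistory[-num:]
--
--
--         for i in range(len(choiceHistory)-num):
--             if choiceHistory[i:i+num] == comb:
--                 if choiceHistory[i+num] == 1:
--                     leftCount+=1
--                 else:
--                     rightCount+=1
--
--     return leftCount, rightCount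
-- ===== SOURCE B (Python) =====
-- def choice_counting(choiceHistory, num):
--     if num == 0:
--         left = choiceHistory.count(1)
--         return left, len(choiceHistory) - left
--     comb = choiceHistory[-num:]
--     # progressively narrow the candidate start positions, one pattern position at a time
--     starts = list(range(len(choiceHistory) - num))
--     for j, c in enumerate(comb):
--         starts = [i for i in starts if choiceHistory[i + j] == c]
--     nxt = [choiceHistory[i + num] for i in starts]
--     left = nxt.count(1)
--     return left, len(nxt) - left
-- ===== Notes on version B (the rewrite author's own statement) =====
-- stated objective: alternative
-- what changed: Instead of slicing out and comparing a fresh length-num window at every start position, B keeps a list of candidate start positions and narrows it with one filtering pass per pattern position, then counts the next choices after the surviving positions (num==0 becomes a direct count); Pre_ excludes negative num, outside the natural domain of a pattern length, where A raises IndexError when -num exceeds the list length and otherwise returns an accident of negative slicing.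
-- outside the precondition, e.g. on choice_counting([1, 2, 3], -1): A returns (0, 0), B raises IndexError
import Mathlib
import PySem

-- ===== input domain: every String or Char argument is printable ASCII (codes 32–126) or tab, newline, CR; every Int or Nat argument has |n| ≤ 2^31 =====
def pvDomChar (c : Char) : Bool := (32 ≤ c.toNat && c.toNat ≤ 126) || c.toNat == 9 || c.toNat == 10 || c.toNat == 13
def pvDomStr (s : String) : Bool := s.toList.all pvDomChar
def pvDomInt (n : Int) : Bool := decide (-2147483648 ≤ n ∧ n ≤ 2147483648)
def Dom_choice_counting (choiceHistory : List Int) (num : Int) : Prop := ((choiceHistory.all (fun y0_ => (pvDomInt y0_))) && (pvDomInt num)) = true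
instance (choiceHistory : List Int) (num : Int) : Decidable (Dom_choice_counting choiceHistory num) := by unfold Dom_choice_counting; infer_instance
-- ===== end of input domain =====

-- B narrows the candidate start positions pattern-position by pattern-position (one filtering pass per
-- pattern element over a shrinking candidate list) instead of comparing a freshly allocated
-- length-num slice at every start position as A does.

-- ===== PORT A =====
def choice_counting (choiceHistory : List Int) (num : Int) : Int × Int :=
  if num == 0 then
    (PySem.List.pyRange 0 (choiceHistory.length : Int) 1).foldl
      (fun (lr : Int × Int) i =>
        if PySem.List.pyGetD choiceHistory i 0 == 1 then (lr.1 + 1, lr.2) else (lr.1, lr.2 + 1))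
      (0, 0)
  else
    let comb := PySem.List.slice choiceHistory (some (-num)) none
    (PySem.List.pyRange 0 ((choiceHistory.length : Int) - num) 1).foldl
      (fun (lr : Int × Int) i =>
        if PySem.List.slice choiceHistory (some i) (some (i + num)) == comb then
          if PySem.List.pyGetD choiceHistory (i + num) 0 == 1 then (lr.1 + 1, lr.2)
          else (lr.1, lr.2 + 1)
        else lr)
      (0, 0)

-- ===== PORT B =====
def choice_counting_alt (choiceHistory : List Int) (num : Int) : Int × Int :=
  if num == 0 then
    let left : Int := (PySem.List.count choiceHistory 1 : Int)
    (left, (choiceHistory.length : Int) - left)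
  else
    let comb := PySem.List.slice choiceHistory (some (-num)) none
    let starts0 := PySem.List.pyRange 0 ((choiceHistory.length : Int) - num) 1
    let starts := (PySem.List.enumerate comb).foldl
      (fun (s : List Int) jc =>
        s.filter (fun i => PySem.List.pyGetD choiceHistory (i + jc.1) 0 == jc.2))
      starts0
    let nxt := starts.map (fun i => PySem.List.pyGetD choiceHistory (i + num) 0)
    let left : Int := (PySem.List.count nxt 1 : Int)
    (left, (nxt.length : Int) - left)

-- ===== PRECONDITION & SPEC =====
-- Pre_ excludes negative num — outside the natural domain of a pattern length: there A raises
-- IndexError whenever -num exceeds len(choiceHistory), and where it does return the value is an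
-- accident of Python's negative slicing/indexing; B raises IndexError on part of that region.
def Pre_choice_counting (choiceHistory : List Int) (num : Int) : Prop := 0 ≤ num
instance (choiceHistory : List Int) (num : Int) : Decidable (Pre_choice_counting choiceHistory num) := by unfold Pre_choice_counting; infer_instance
def pvWitness_choice_counting : List Int × Int := ([1, 2, 1, 1, 2, 1], 2)

def Spec_choice_counting (choiceHistory : List Int) (num : Int) (out : Int × Int) : Prop := out = choice_counting_alt choiceHistory num
instance (choiceHistory : List Int) (num : Int) (out : Int × Int) : Decidable (Spec_choice_counting choiceHistory num out) := by unfold Spec_choice_counting; infer_instance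

-- ===== CLAIM (what is proved, stated in full; the proofs are below) =====
def Claim_equal_choice_counting : Prop := ∀ (choiceHistory : List Int) (num : Int), Dom_choice_counting choiceHistory num → Pre_choice_counting choiceHistory num → Spec_choice_counting choiceHistory num (choice_counting choiceHistory num)

-- ===== LEMMAS AND PROOFS =====

-- the counting step both programs ultimately perform on the list of next choices
def pvStep (lr : Int × Int) (v : Int) : Int × Int :=
  if v == 1 then (lr.1 + 1, lr.2) else (lr.1, lr.2 + 1)

theorem pvStep_fold (xs : List Int) (a b : Int) :
    xs.foldl pvStep (a, b) = (a + (xs.count 1 : Int), b + (xs.length : Int) - (xs.count 1 : Int)) := by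
  induction xs generalizing a b with
  | nil => simp
  | cons x t ih =>
      by_cases hx : x = 1
      · subst hx
        simp [pvStep, ih]
        constructor <;> ring
      · simp [pvStep, hx, ih]
        omega

-- B's chain of filters over the enumerated pattern is one filter by the conjunction of all tests
theorem pvFilterFold (L : List Int) (ps : List (Int × Int)) (s : List Int) :
    ps.foldl (fun (s : List Int) jc =>
        s.filter (fun i => PySem.List.pyGetD L (i + jc.1) 0 == jc.2)) s
      = s.filter (fun i => ps.all (fun jc => PySem.List.pyGetD L (i + jc.1) 0 == jc.2)) := by
  induction ps generalizing s with
  | nil => simp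
  | cons p t ih =>
      simp only [List.foldl_cons, ih, List.filter_filter, List.all_cons]
      apply List.filter_congr
      intro i _
      exact Bool.and_comm _ _

-- A's filtered-counting loop, in A's exact lambda shape, as a pvStep fold over the matched next-choices
theorem pvAfold (L : List Int) (num : Int) (comb : List Int) (ys : List Int) (acc : Int × Int) :
    ys.foldl
      (fun (lr : Int × Int) i =>
        if PySem.List.slice L (some i) (some (i + num)) == comb then
          if PySem.List.pyGetD L (i + num) 0 == 1 then (lr.1 + 1, lr.2)
          else (lr.1, lr.2 + 1)
        else lr) acc
    = ((ys.filter (fun i => PySem.List.slice L (some i) (some (i + num)) == comb)).map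
        (fun i => PySem.List.pyGetD L (i + num) 0)).foldl pvStep acc := by
  induction ys generalizing acc with
  | nil => simp
  | cons y t ih =>
      cases hy : (PySem.List.slice L (some y) (some (y + num)) == comb)
      · simp only [List.foldl_cons, List.filter_cons, hy, Bool.false_eq_true, if_false]
        exact ih _
      · simp only [List.foldl_cons, List.filter_cons, hy, if_true, List.map_cons]
        rw [ih]
        rfl

-- pointwise: A's slice-vs-pattern test equals B's per-position test, for an in-range start i
theorem pvCond (L : List Int) (num i : Int) (hnum : 0 < num) (hi : 0 ≤ i)
    (hin : i < (L.length : Int) - num) :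
    (PySem.List.slice L (some i) (some (i + num)) == PySem.List.slice L (some (-num)) none)
      = (PySem.List.enumerate (PySem.List.slice L (some (-num)) none)).all
          (fun jc => PySem.List.pyGetD L (i + jc.1) 0 == jc.2) := by
  obtain ⟨k, hk⟩ : ∃ k : Nat, num = (k : Int) := ⟨num.toNat, (Int.toNat_of_nonneg hnum.le).symm⟩
  obtain ⟨t, ht⟩ : ∃ t : Nat, i = (t : Int) := ⟨i.toNat, (Int.toNat_of_nonneg hi).symm⟩
  subst hk ht
  have hk0 : 0 < k := by exact_mod_cast hnum
  have htk : t + k < L.length := by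
    have h1 : (t : Int) < (L.length : Int) - (k : Int) := hin
    omega
  have hcomb : PySem.List.slice L (some (-(k : Int))) none = L.drop (L.length - k) :=
    PySem.List.slice_from_neg_natCast L k hk0
  have hslice : PySem.List.slice L (some (t : Int)) (some ((t : Int) + (k : Int)))
      = (L.drop t).take k := PySem.List.slice_natCast_add L t k
  rw [hcomb, hslice]
  have hlen1 : ((L.drop t).take k).length = k := by simp; omega
  have hlen2 : (L.drop (L.length - k)).length = k := by simp; omega
  apply Bool.eq_iff_iff.mpr
  simp only [beq_iff_eq, List.all_eq_true, PySem.List.mem_enumerate_iff]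
  constructor
  · rintro heq jc ⟨j, hj, rfl⟩
    have hj' : j < k := by rw [hlen2] at hj; exact hj
    have h3 := List.getElem_of_eq heq (show j < ((L.drop t).take k).length by omega)
    simp only [List.getElem_take, List.getElem_drop] at h3
    have hidx : (t : Int) + (0 + (j : Int)) = ((t + j : Nat) : Int) := by push_cast; ring
    simp only [List.getElem_drop]
    rw [hidx, PySem.List.pyGetD_natCast]
    rw [List.getD_eq_getElem _ _ (by omega)]
    exact h3
  · intro hall
    apply List.ext_getElem (by omega)
    intro j hj1 hj2
    have hj' : j < k := by omega
    have := hall ((0 + (j : Int)), (L.drop (L.length - k))[j]'(by omega)) ⟨j, by omega, rfl⟩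
    have hidx : (t : Int) + (0 + (j : Int)) = ((t + j : Nat) : Int) := by push_cast; ring
    rw [hidx, PySem.List.pyGetD_natCast, List.getD_eq_getElem _ _ (by omega)] at this
    simp only [List.getElem_drop] at this
    simp only [List.getElem_take, List.getElem_drop]
    exact this

-- ===== VERDICT (by name: the statement is the Claim_ definition above) =====
theorem choice_counting_spec : Claim_equal_choice_counting := by
  intro L num _ hpre
  unfold Spec_choice_counting
  have hpre' : 0 ≤ num := hpre
  by_cases h0 : num = 0
  · subst h0
    simp only [choice_counting, choice_counting_alt]
    show (PySem.List.pyRange 0 (L.length : Int) 1).foldl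
        (fun lr i => pvStep lr (PySem.List.pyGetD L i 0)) (0, 0) = _
    rw [PySem.List.foldl_pyRange_zero_pyGetD' L 0 pvStep (0, 0), pvStep_fold]
    simp [PySem.List.count_eq]
  · have hpos : 0 < num := lt_of_le_of_ne hpre' (Ne.symm h0)
    have h0' : (num == 0) = false := by simpa using h0
    simp only [choice_counting, choice_counting_alt, h0', Bool.false_eq_true, if_false]
    rw [pvAfold, pvFilterFold]
    have hfc : (PySem.List.pyRange 0 ((L.length : Int) - num) 1).filter
        (fun i => PySem.List.slice L (some i) (some (i + num))
          == PySem.List.slice L (some (-num)) none)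
        = (PySem.List.pyRange 0 ((L.length : Int) - num) 1).filter
        (fun i => (PySem.List.enumerate (PySem.List.slice L (some (-num)) none)).all
          (fun jc => PySem.List.pyGetD L (i + jc.1) 0 == jc.2)) := by
      apply List.filter_congr
      intro i hi
      rw [PySem.List.mem_pyRange_one] at hi
      exact pvCond L num i hpos hi.1 hi.2
    rw [hfc, pvStep_fold]
    simp [PySem.List.count_eq]
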